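-- pv_equiv track=rewrite | github.com/dh7hong/algorithms-level-3-SDY | 64_gym-clothes.py | solution
-- ===== SOURCE A (Python) =====
-- def solution(n, lost, reserve):
--     # Convert lists to sets for efficient lookup and removal
--     lost_set = set(lost)
--     reserve_set = set(reserve)
--
--     # Handle intersection (students who appear in both lost and reserve)
--     intersection = lost_set & reserve_set
--     lost_set -= intersection
--     reserve_set -= intersection
--
--     # Try to lend gym clothes to lost students
--     for student in sorted(lost_set):
--         if student - 1 in reserve_set:  # Check the previous student
--             reserve_set.remove(student - 1)
--             lost_set.remove(student)
--         elif student + 1 in reserve_set:  # Check the next student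
--             reserve_set.remove(student + 1)
--             lost_set.remove(student)
--
--     # Calculate and return the maximum number of students able to attend
--     return n - len(lost_set)
-- ===== SOURCE B (Python) =====
-- def solution(n, lost, reserve):
--     # Sorted two-pointer greedy: one left-to-right merge over the two sorted
--     # distinct lists replaces A's per-student set membership tests and removals.
--     L = sorted(set(lost) - set(reserve))
--     R = sorted(set(reserve) - set(lost))
--     matched = 0
--     j = 0
--     for s in L:
--         while j < len(R) and R[j] < s - 1:
--             j += 1
--         if j < len(R) and R[j] <= s + 1:
--             matched += 1
--             j += 1
--     return n - len(L) + matched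
-- ===== Notes on version B (the rewrite author's own statement) =====
-- stated objective: alternative
-- what changed: Replaces A's per-student set membership tests and removals on a mutated reserve set by a single two-pointer merge over the two sorted distinct lists, counting matches instead of shrinking the lost set.
import Mathlib
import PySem

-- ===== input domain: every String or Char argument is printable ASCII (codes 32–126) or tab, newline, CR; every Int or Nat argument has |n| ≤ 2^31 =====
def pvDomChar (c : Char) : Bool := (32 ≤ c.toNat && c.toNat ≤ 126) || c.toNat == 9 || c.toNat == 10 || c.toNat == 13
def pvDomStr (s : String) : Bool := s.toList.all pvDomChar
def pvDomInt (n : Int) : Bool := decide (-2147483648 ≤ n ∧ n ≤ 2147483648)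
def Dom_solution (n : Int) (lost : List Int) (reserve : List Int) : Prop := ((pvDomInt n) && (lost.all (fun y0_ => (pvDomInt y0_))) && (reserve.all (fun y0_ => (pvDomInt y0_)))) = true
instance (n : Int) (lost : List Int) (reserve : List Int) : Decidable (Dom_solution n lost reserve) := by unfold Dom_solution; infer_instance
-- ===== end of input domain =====

-- B replaces A's per-student set lookups/removals on a mutated reserve set by a single
-- two-pointer merge over the two sorted distinct lists (alternative algorithm, same cost class).

-- ===== PORT A =====
-- A's loop body; lost_set.remove/reserve_set.remove are guarded by the membership test of the
-- same branch, so Set.discard is exact here.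
def stepA (st : PySem.Set Int × PySem.Set Int) (s : Int) : PySem.Set Int × PySem.Set Int :=
  if PySem.Set.contains st.2 (s - 1) then
    (PySem.Set.discard st.1 s, PySem.Set.discard st.2 (s - 1))
  else if PySem.Set.contains st.2 (s + 1) then
    (PySem.Set.discard st.1 s, PySem.Set.discard st.2 (s + 1))
  else st

def solution (n : Int) (lost : List Int) (reserve : List Int) : Int :=
  let lostSet0 := PySem.Set.ofList lost
  let reserveSet0 := PySem.Set.ofList reserve
  let inter := PySem.Set.inter lostSet0 reserveSet0
  let lostSet := PySem.Set.diff lostSet0 inter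
  let reserveSet := PySem.Set.diff reserveSet0 inter
  let final := (PySem.List.sorted lostSet (fun x => x) false).foldl stepA (lostSet, reserveSet)
  n - (final.1.length : Int)

-- ===== PORT B =====
-- the 'while j < len(R) and R[j] < s - 1' loop
def skipB (R : List Int) (s : Int) (j : Nat) : Nat :=
  if h : j < R.length then
    if R[j] < s - 1 then skipB R s (j + 1) else j
  else j
termination_by R.length - j

-- body of 'for s in L', state (matched, j)
def stepB (R : List Int) (st : Int × Nat) (s : Int) : Int × Nat :=
  let j := skipB R s st.2
  if h : j < R.length then
    if R[j] ≤ s + 1 then (st.1 + 1, j + 1) else (st.1, j)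
  else (st.1, j)

def solution_alt (n : Int) (lost : List Int) (reserve : List Int) : Int :=
  let L := PySem.List.sorted (PySem.Set.diff (PySem.Set.ofList lost) (PySem.Set.ofList reserve)) (fun x => x) false
  let R := PySem.List.sorted (PySem.Set.diff (PySem.Set.ofList reserve) (PySem.Set.ofList lost)) (fun x => x) false
  let fin := L.foldl (stepB R) (0, 0)
  n - (L.length : Int) + fin.1

-- ===== PRECONDITION & SPEC =====
def Spec_solution (n : Int) (lost : List Int) (reserve : List Int) (out : Int) : Prop := out = solution_alt n lost reserve
instance (n : Int) (lost : List Int) (reserve : List Int) (out : Int) : Decidable (Spec_solution n lost reserve out) := by unfold Spec_solution; infer_instance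

-- ===== CLAIM (what is proved, stated in full; the proofs are below) =====
def Claim_equal_solution : Prop := ∀ (n : Int) (lost : List Int) (reserve : List Int), Dom_solution n lost reserve → Spec_solution n lost reserve (solution n lost reserve)

-- ===== LEMMAS AND PROOFS =====

theorem skipB_le (R : List Int) (s : Int) (j : Nat) : j ≤ skipB R s j := by
  fun_induction skipB R s j with
  | case1 j h hlt ih => omega
  | case2 j h hlt => omega
  | case3 j h => omega

theorem skipB_le_length (R : List Int) (s : Int) (j : Nat) (h : j ≤ R.length) :
    skipB R s j ≤ R.length := by
  fun_induction skipB R s j with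
  | case1 j h' hlt ih => exact ih (by omega)
  | case2 j h' hlt => omega
  | case3 j h' => omega

theorem skipB_stop (R : List Int) (s : Int) (j : Nat) (h : skipB R s j < R.length) :
    s - 1 ≤ R[skipB R s j] := by
  fun_induction skipB R s j with
  | case1 j h' hlt ih => exact ih h
  | case2 j h' hlt => omega
  | case3 j h' => omega

theorem skipB_mem (R : List Int) (s : Int) (j : Nat)
    (x : Int) (hx : s - 1 ≤ x) : x ∈ R.drop j ↔ x ∈ R.drop (skipB R s j) := by
  fun_induction skipB R s j with
  | case1 j h hlt ih =>
      rw [List.drop_eq_getElem_cons h]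
      rw [← ih]
      simp only [List.mem_cons]
      constructor
      · rintro (rfl | hmem)
        · omega
        · exact hmem
      · intro hmem; exact Or.inr hmem
  | case2 j h hlt => rfl
  | case3 j h => rfl

-- the length of discard of a present element in a nodup list
theorem length_discard_mem (ls : List Int) (s : Int) (hnd : ls.Nodup) (hs : s ∈ ls) :
    (PySem.Set.discard ls s).length = ls.length - 1 := by
  have h1 : PySem.Set.discard ls s = ls.erase s := by
    rw [List.Nodup.erase_eq_filter hnd]
    rfl
  rw [h1, List.length_erase_of_mem hs]

theorem pairwise_lt_of_le_nodup (l : List Int) (h1 : l.Pairwise (· ≤ ·)) (h2 : l.Nodup) :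
    l.Pairwise (· < ·) := by
  have := h1.and h2
  exact this.imp (fun h => lt_of_le_of_ne h.1 h.2)

-- main loop correspondence: A's set-mutating greedy and B's two-pointer counting greedy
theorem mainLoop (R : List Int) (hR : R.Pairwise (· < ·)) :
    ∀ (L ls rs : List Int) (j : Nat) (m : Int) (lo : Int),
    L.Pairwise (· < ·) →
    (∀ s ∈ L, lo ≤ s - 1) →
    (∀ s ∈ L, s ∉ R) →
    ls.Nodup →
    (∀ s ∈ L, s ∈ ls) →
    j ≤ R.length →
    (∀ x : Int, lo ≤ x → (x ∈ rs ↔ x ∈ R.drop j)) →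
    ((L.foldl stepA (ls, rs)).1.length : Int) + (L.foldl (stepB R) (m, j)).1
      = (ls.length : Int) + m := by
  intro L
  induction L with
  | nil => intro ls rs j m lo _ _ _ _ _ _ _; simp
  | cons s L' ih =>
    intro ls rs j m lo hLp hlo hdisj hnd hsub hj hinv
    have hLp' : L'.Pairwise (· < ·) := hLp.tail
    have hheadlt : ∀ s' ∈ L', s < s' := (List.pairwise_cons.mp hLp).1
    have hlos : lo ≤ s - 1 := hlo s (List.mem_cons_self)
    have hsR : s ∉ R := hdisj s (List.mem_cons_self)
    have hsls : s ∈ ls := hsub s (List.mem_cons_self)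
    set j' := skipB R s j with hj'
    have hjj' : j ≤ j' := skipB_le R s j
    have hj'len : j' ≤ R.length := skipB_le_length R s j hj
    -- invariant pushed through the skip
    have hinv' : ∀ x : Int, s - 1 ≤ x → (x ∈ rs ↔ x ∈ R.drop j') := by
      intro x hx
      rw [hinv x (by omega), skipB_mem R s j x hx]
    simp only [List.foldl_cons]
    by_cases h1 : j' < R.length
    · have hdropj' : R.drop j' = R[j'] :: R.drop (j' + 1) := List.drop_eq_getElem_cons h1
      have hstop : s - 1 ≤ R[j'] := skipB_stop R s j h1
      have hrest : ∀ x ∈ R.drop (j' + 1), R[j'] < x := by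
        have hsubl : (R.drop j').Pairwise (· < ·) :=
          List.Pairwise.sublist (List.drop_sublist j' R) hR
        rw [hdropj'] at hsubl
        exact (List.pairwise_cons.mp hsubl).1
      have hRj'ne : R[j'] ≠ s := fun h => hsR (h ▸ List.getElem_mem h1)
      by_cases h2 : R[j'] ≤ s + 1
      · -- B matches; R[j'] = s - 1 or s + 1
        have hstepB : stepB R (m, j) s = (m + 1, j' + 1) := by
          simp only [stepB, ← hj']
          rw [dif_pos h1, if_pos h2]
        rw [hstepB]
        by_cases hcase : R[j'] = s - 1
        · -- A takes the s-1 branch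
          have hmem : s - 1 ∈ rs := by
            rw [hinv' (s - 1) le_rfl, hdropj', hcase]; exact List.mem_cons_self
          have hstepA : stepA (ls, rs) s
              = (PySem.Set.discard ls s, PySem.Set.discard rs (s - 1)) := by
            simp only [stepA]
            rw [if_pos ((PySem.Set.contains_iff rs (s - 1)).mpr hmem)]
          rw [hstepA]
          have hrec := ih (PySem.Set.discard ls s) (PySem.Set.discard rs (s - 1))
            (j' + 1) (m + 1) s hLp'
            (fun s' hs' => by have := hheadlt s' hs'; omega)
            (fun s' hs' => hdisj s' (List.mem_cons_of_mem _ hs'))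
            (PySem.Set.nodup_discard ls s hnd)
            (fun s' hs' => (PySem.Set.mem_discard ls s s').mpr
              ⟨hsub s' (List.mem_cons_of_mem _ hs'), by have := hheadlt s' hs'; omega⟩)
            (by omega)
            (by
              intro x hx
              rw [PySem.Set.mem_discard, hinv' x (by omega), hdropj', hcase]
              simp only [List.mem_cons]
              constructor
              · rintro ⟨(h | h), hne⟩
                · omega
                · exact h
              · intro h; exact ⟨Or.inr h, by omega⟩)
          rw [hrec, length_discard_mem ls s hnd hsls]
          have : 1 ≤ ls.length := List.length_pos_of_mem hsls
          omega
        · -- R[j'] = s + 1 : A's first test fails, second succeeds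
          have hcase2 : R[j'] = s + 1 := by omega
          have hnomem : s - 1 ∉ rs := by
            rw [hinv' (s - 1) le_rfl, hdropj']
            intro h
            rcases List.mem_cons.mp h with h | h
            · omega
            · have := hrest _ h; omega
          have hmem : s + 1 ∈ rs := by
            rw [hinv' (s + 1) (by omega), hdropj', hcase2]; exact List.mem_cons_self
          have hstepA : stepA (ls, rs) s
              = (PySem.Set.discard ls s, PySem.Set.discard rs (s + 1)) := by
            simp only [stepA]
            rw [if_neg, if_pos ((PySem.Set.contains_iff rs (s + 1)).mpr hmem)]
            simp only [PySem.Set.contains_eq_listContains, List.contains_eq_mem, decide_eq_true_eq] at *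
            exact fun h => hnomem (by simpa using h)
          rw [hstepA]
          have hs1rest : s + 1 ∉ R.drop (j' + 1) := by
            intro h; have := hrest _ h; omega
          have hrec := ih (PySem.Set.discard ls s) (PySem.Set.discard rs (s + 1))
            (j' + 1) (m + 1) s hLp'
            (fun s' hs' => by have := hheadlt s' hs'; omega)
            (fun s' hs' => hdisj s' (List.mem_cons_of_mem _ hs'))
            (PySem.Set.nodup_discard ls s hnd)
            (fun s' hs' => (PySem.Set.mem_discard ls s s').mpr
              ⟨hsub s' (List.mem_cons_of_mem _ hs'), by have := hheadlt s' hs'; omega⟩)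
            (by omega)
            (by
              intro x hx
              rw [PySem.Set.mem_discard, hinv' x (by omega), hdropj', hcase2]
              simp only [List.mem_cons]
              constructor
              · rintro ⟨(h | h), hne⟩
                · omega
                · exact h
              · intro h; exact ⟨Or.inr h, fun he => hs1rest (he ▸ h)⟩)
          rw [hrec, length_discard_mem ls s hnd hsls]
          have : 1 ≤ ls.length := List.length_pos_of_mem hsls
          omega
      · -- R[j'] > s + 1 : neither neighbour available, both skip
        have hstepB : stepB R (m, j) s = (m, j') := by
          simp only [stepB, ← hj']
          rw [dif_pos h1, if_neg h2]
        have hnone : ∀ y : Int, s - 1 ≤ y → y ≤ s + 1 → y ∉ rs := by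
          intro y h1y h2y
          rw [hinv' y h1y, hdropj']
          intro h
          rcases List.mem_cons.mp h with h | h
          · omega
          · have := hrest _ h; omega
        have hstepA : stepA (ls, rs) s = (ls, rs) := by
          simp only [stepA]
          rw [if_neg, if_neg]
          · simp only [PySem.Set.contains_eq_listContains, List.contains_eq_mem, decide_eq_true_eq] at *
            exact fun h => hnone (s + 1) (by omega) (by omega) (by simpa using h)
          · simp only [PySem.Set.contains_eq_listContains, List.contains_eq_mem, decide_eq_true_eq] at *
            exact fun h => hnone (s - 1) (by omega) (by omega) (by simpa using h)
        rw [hstepA, hstepB]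
        exact ih ls rs j' m s hLp'
          (fun s' hs' => by have := hheadlt s' hs'; omega)
          (fun s' hs' => hdisj s' (List.mem_cons_of_mem _ hs'))
          hnd
          (fun s' hs' => hsub s' (List.mem_cons_of_mem _ hs'))
          hj'len
          (fun x hx => hinv' x (by omega))
    · -- pointer exhausted: drop j' R = []
      have hj'eq : j' = R.length := by omega
      have hdropj' : R.drop j' = [] := by
        rw [hj'eq]; exact List.drop_length
      have hstepB : stepB R (m, j) s = (m, j') := by
        simp only [stepB, ← hj']
        rw [dif_neg h1]
      have hnone : ∀ y : Int, s - 1 ≤ y → y ∉ rs := by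
        intro y hy
        rw [hinv' y hy, hdropj']
        simp
      have hstepA : stepA (ls, rs) s = (ls, rs) := by
        simp only [stepA]
        rw [if_neg, if_neg]
        · simp only [PySem.Set.contains_eq_listContains, List.contains_eq_mem, decide_eq_true_eq] at *
          exact fun h => hnone (s + 1) (by omega) (by simpa using h)
        · simp only [PySem.Set.contains_eq_listContains, List.contains_eq_mem, decide_eq_true_eq] at *
          exact fun h => hnone (s - 1) (by omega) (by simpa using h)
      rw [hstepA, hstepB]
      exact ih ls rs j' m s hLp'
        (fun s' hs' => by have := hheadlt s' hs'; omega)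
        (fun s' hs' => hdisj s' (List.mem_cons_of_mem _ hs'))
        hnd
        (fun s' hs' => hsub s' (List.mem_cons_of_mem _ hs'))
        hj'len
        (fun x hx => hinv' x (by omega))

-- A's 'lost_set -= lost & reserve' equals B's 'set(lost) - set(reserve)' as a list
theorem diff_inter_left (a b : List Int) :
    PySem.Set.diff (PySem.Set.ofList a)
        (PySem.Set.inter (PySem.Set.ofList a) (PySem.Set.ofList b))
      = PySem.Set.diff (PySem.Set.ofList a) (PySem.Set.ofList b) := by
  simp only [PySem.Set.diff, PySem.Set.inter]
  apply List.filter_congr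
  intro x hx
  simp only [PySem.Set.mem_ofList] at hx
  simp only [Bool.not_eq_eq_eq_not]
  simp [hx]

-- A's 'reserve_set -= lost & reserve' equals B's 'set(reserve) - set(lost)' as a list
theorem diff_inter_right (a b : List Int) :
    PySem.Set.diff (PySem.Set.ofList b)
        (PySem.Set.inter (PySem.Set.ofList a) (PySem.Set.ofList b))
      = PySem.Set.diff (PySem.Set.ofList b) (PySem.Set.ofList a) := by
  simp only [PySem.Set.diff, PySem.Set.inter]
  apply List.filter_congr
  intro x hx
  simp only [PySem.Set.mem_ofList] at hx
  simp only [Bool.not_eq_eq_eq_not]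
  simp [hx]

-- ===== VERDICT (by name: the statement is the Claim_ definition above) =====
theorem solution_spec : Claim_equal_solution := by
  intro n lost reserve _
  unfold Spec_solution solution solution_alt
  dsimp only
  rw [diff_inter_left, diff_inter_right]
  set ls := PySem.Set.diff (PySem.Set.ofList lost) (PySem.Set.ofList reserve) with hls
  set rs := PySem.Set.diff (PySem.Set.ofList reserve) (PySem.Set.ofList lost) with hrs
  set L := PySem.List.sorted ls (fun x => x) false with hL
  set R := PySem.List.sorted rs (fun x => x) false with hR
  have hndls : ls.Nodup := PySem.Set.nodup_diff _ _ (PySem.Set.nodup_ofList lost)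
  have hndrs : rs.Nodup := PySem.Set.nodup_diff _ _ (PySem.Set.nodup_ofList reserve)
  have hndL : L.Nodup := ((PySem.List.sorted_perm ls (fun x => x) false).nodup_iff).mpr hndls
  have hndR : R.Nodup := ((PySem.List.sorted_perm rs (fun x => x) false).nodup_iff).mpr hndrs
  have hLp : L.Pairwise (· < ·) :=
    pairwise_lt_of_le_nodup L (PySem.List.sorted_pairwise ls (fun x => x)) hndL
  have hRp : R.Pairwise (· < ·) :=
    pairwise_lt_of_le_nodup R (PySem.List.sorted_pairwise rs (fun x => x)) hndR
  have hdisj : ∀ s ∈ L, s ∉ R := by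
    intro s hs hsR
    rw [hL, PySem.List.mem_sorted, hls, PySem.Set.mem_diff] at hs
    rw [hR, PySem.List.mem_sorted, hrs, PySem.Set.mem_diff] at hsR
    simp only [PySem.Set.mem_ofList] at hs hsR
    exact hs.2 hsR.1
  have hsub : ∀ s ∈ L, s ∈ ls := fun s hs => (PySem.List.mem_sorted ls _ false s).mp hs
  have hinv : ∀ x : Int, (x ∈ rs ↔ x ∈ R.drop 0) := by
    intro x
    rw [List.drop_zero, hR, PySem.List.mem_sorted]
  have hlenL : L.length = ls.length := PySem.List.length_sorted ls _ false
  cases hLcase : L with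
  | nil =>
      rw [hLcase] at hlenL
      simp only [List.foldl_nil, List.length_nil] at hlenL ⊢
      omega
  | cons s t =>
      have hmain := mainLoop R hRp L ls rs 0 0 (s - 1) hLp
        (by
          intro s' hs'
          rw [hLcase] at hs' hLp
          rcases List.mem_cons.mp hs' with rfl | h
          · omega
          · have := (List.pairwise_cons.mp hLp).1 s' h; omega)
        hdisj hndls hsub (by omega) (fun x _ => hinv x)
      rw [← hLcase]
      omega
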